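-- pv_equiv track=rewrite | github.com/Hunter-Dinan/cp1404practicals | prac_09/cleanup_files.py | get_fixed_filename_correction_3
-- ===== SOURCE A (Python) =====
-- def get_fixed_filename_correction_3(filename):
--     """Add uppercase after '_', e.g. O_little_town_of_bethlehem -> O_Little_Town_Of_Bethlehem."""
--     fixed_filename = ''
--     slice_index = 0
--     for i, char in enumerate(filename):
--         if i > 0:
--             if filename[i - 1] == '_':
--                 fixed_name_part = filename[slice_index:i] + char.upper()
--                 slice_index = i + 1
--                 fixed_filename += fixed_name_part
--     fixed_filename = fixed_filename + filename[slice_index:]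
--     return fixed_filename
-- ===== SOURCE B (Python) =====
-- def get_fixed_filename_correction_3(filename):
--     """Add uppercase after '_', e.g. O_little_town_of_bethlehem -> O_Little_Town_Of_Bethlehem."""
--     return filename[:1] + ''.join(
--         c.upper() if prev == '_' else c
--         for prev, c in zip(filename, filename[1:]))
-- ===== Notes on version B (the rewrite author's own statement) =====
-- stated objective: simpler
-- what changed: Replaces A's stateful scan (enumerate with slice_index bookkeeping and concatenation of pending slices) by a stateless pairwise zip of the string with its one-shifted self that uppercases each character whose predecessor is an underscore, prefixed by the unchanged first character.
import Mathlib
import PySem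

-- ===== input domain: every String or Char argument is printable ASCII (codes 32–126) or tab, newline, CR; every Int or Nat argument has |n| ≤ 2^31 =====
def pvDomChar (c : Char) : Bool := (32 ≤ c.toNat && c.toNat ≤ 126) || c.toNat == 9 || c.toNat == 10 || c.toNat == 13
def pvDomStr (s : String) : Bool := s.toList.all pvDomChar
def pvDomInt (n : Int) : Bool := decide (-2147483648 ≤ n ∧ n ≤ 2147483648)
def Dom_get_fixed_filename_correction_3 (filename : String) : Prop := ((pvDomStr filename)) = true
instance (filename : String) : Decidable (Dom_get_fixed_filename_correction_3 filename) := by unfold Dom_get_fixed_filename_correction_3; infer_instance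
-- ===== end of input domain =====

-- B replaces A's index/slice bookkeeping loop by a pairwise zip of the string with its
-- one-shifted self, uppercasing each character whose predecessor is an underscore (objective: simpler).

-- ===== PORT A =====
-- loop body of A's 'for i, char in enumerate(filename)' (state = (fixed_filename, slice_index))
def pvStepA (cs : List Char) (st : List Char × Int) (ic : Int × Char) : List Char × Int :=
  if ic.1 > 0 then
    if PySem.List.pyGetD cs (ic.1 - 1) ' ' = '_' then
      (st.1 ++ PySem.List.slice cs (some st.2) (some ic.1) ++ [PySem.Chars.upperChar ic.2],
       ic.1 + 1)
    else st
  else st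

def get_fixed_filename_correction_3 (filename : String) : String :=
  let cs := filename.toList
  let st := (PySem.List.enumerate cs 0).foldl (pvStepA cs) (([] : List Char), (0 : Int))
  String.ofList (st.1 ++ PySem.List.slice cs (some st.2) none)

-- ===== PORT B =====
def get_fixed_filename_correction_3_alt (filename : String) : String :=
  let cs := filename.toList
  String.ofList
    (PySem.List.slice cs none (some 1) ++
      PySem.Chars.join []
        ((cs.zip cs.tail).map
          (fun pc => if pc.1 = '_' then [PySem.Chars.upperChar pc.2] else [pc.2])))

-- ===== PRECONDITION & SPEC =====
def Spec_get_fixed_filename_correction_3 (filename : String) (out : String) : Prop := out = get_fixed_filename_correction_3_alt filename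
instance (filename : String) (out : String) : Decidable (Spec_get_fixed_filename_correction_3 filename out) := by unfold Spec_get_fixed_filename_correction_3; infer_instance

-- ===== CLAIM (what is proved, stated in full; the proofs are below) =====
def Claim_equal_get_fixed_filename_correction_3 : Prop := ∀ (filename : String), Dom_get_fixed_filename_correction_3 filename → Spec_get_fixed_filename_correction_3 filename (get_fixed_filename_correction_3 filename)

-- ===== LEMMAS AND PROOFS =====

-- B's transformation, at the List Char level
def pvT (cs : List Char) : List Char :=
  cs.take 1 ++
    (cs.zip cs.tail).map (fun pc => if pc.1 = '_' then PySem.Chars.upperChar pc.2 else pc.2)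

lemma pvT_length (cs : List Char) : (pvT cs).length = cs.length := by
  cases cs with
  | nil => simp [pvT]
  | cons a l => simp [pvT]

lemma pvT_get_zero (cs : List Char) (h : 0 < cs.length) : (pvT cs)[0]? = cs[0]? := by
  cases cs with
  | nil => simp at h
  | cons a l => simp [pvT]

lemma pvT_get_succ (cs : List Char) (j : Nat) (h : j + 1 < cs.length) :
    (pvT cs)[j+1]? =
      some (if cs[j]'(by omega) = '_' then PySem.Chars.upperChar (cs[j+1]'h)
            else cs[j+1]'h) := by
  cases cs with
  | nil => simp at h
  | cons a l =>
    have hj : j < l.length := by simpa using h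
    simp [pvT, List.getElem?_eq_getElem, hj, List.getElem_zip]

lemma pv_take_drop_agree (T cs : List Char) (si : Nat)
    (hlen : T.length = cs.length) (hsi : si ≤ cs.length)
    (h : ∀ j, si ≤ j → j < cs.length → T[j]? = cs[j]?) :
    T.take si ++ cs.drop si = T := by
  apply List.ext_getElem?
  intro j
  by_cases hj : j < si
  · rw [List.getElem?_append_left (by simp; omega)]
    simp [List.getElem?_take, hj]
  · rw [List.getElem?_append_right (by simp; omega)]
    have hlt : (T.take si).length = si := by simp; omega
    rw [hlt, List.getElem?_drop]
    have : si + (j - si) = j := by omega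
    rw [this]
    by_cases hb : j < cs.length
    · exact (h j (by omega) hb).symm
    · rw [List.getElem?_eq_none (by omega), List.getElem?_eq_none (by omega)]

lemma pv_mid_agree (T cs : List Char) (si k : Nat)
    (hsi : si ≤ k) (hk : k ≤ cs.length)
    (h : ∀ j, si ≤ j → j < k → T[j]? = cs[j]?) :
    (cs.drop si).take (k - si) = (T.drop si).take (k - si) := by
  apply List.ext_getElem?
  intro j
  by_cases hj : j < k - si
  · rw [List.getElem?_take_of_lt hj, List.getElem?_take_of_lt hj,
        List.getElem?_drop, List.getElem?_drop]
    exact (h (si + j) (by omega) (by omega)).symm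
  · rw [List.getElem?_eq_none (by simp; omega), List.getElem?_eq_none (by simp; omega)]

-- main loop invariant for A
lemma pv_loop_inv (cs : List Char) :
    ∀ (rest : List Char) (k si : Nat) (fixed : List Char),
      cs.drop k = rest → si ≤ k → si ≤ cs.length →
      fixed = (pvT cs).take si →
      (∀ j, si ≤ j → j < k → (pvT cs)[j]? = cs[j]?) →
      (((PySem.List.enumerate rest (k : Int)).foldl (pvStepA cs) (fixed, (si : Int))).1 ++
        PySem.List.slice cs
          (some ((PySem.List.enumerate rest (k : Int)).foldl (pvStepA cs) (fixed, (si : Int))).2)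
          none) = pvT cs := by
  intro rest
  induction rest with
  | nil =>
    intro k si fixed hdrop hsik hsil hfix hpend
    have hklen : cs.length ≤ k := by
      by_contra h
      push_neg at h
      have := congrArg List.length hdrop
      simp at this
      omega
    simp only [PySem.List.enumerate_nil, List.foldl_nil]
    rw [PySem.List.slice_from_natCast, hfix]
    exact pv_take_drop_agree _ _ _ (pvT_length cs) hsil
      (fun j h1 h2 => hpend j h1 (by omega))
  | cons c rest' ih =>
    intro k si fixed hdrop hsik hsil hfix hpend
    have hck : cs[k]? = some c := by
      have : (cs.drop k)[0]? = some c := by rw [hdrop]; simp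
      rwa [List.getElem?_drop, Nat.add_zero] at this
    have hklen : k < cs.length := by
      by_contra h
      rw [List.getElem?_eq_none (by omega)] at hck
      simp at hck
    have hdrop' : cs.drop (k + 1) = rest' := by
      have := congrArg List.tail hdrop
      simpa [List.tail_drop] using this
    rw [PySem.List.enumerate_cons, List.foldl_cons]
    by_cases hk0 : k = 0
    · -- i = 0: loop body does nothing
      subst hk0
      have hstep : pvStepA cs (fixed, (si : Int)) ((((0 : Nat)) : Int), c) = (fixed, (si : Int)) := by
        simp [pvStepA]
      rw [hstep]
      have hcast : ((((0 : Nat)) : Int) + 1) = ((1 : Nat) : Int) := by norm_num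
      rw [hcast]
      exact ih 1 si fixed hdrop' (by omega) hsil hfix
        (fun j h1 h2 => by
          have hj0 : j = 0 := by omega
          subst hj0
          rw [pvT_get_zero cs (by omega)])
    · -- i = k > 0
      have hkpos : (0 : Int) < (k : Int) := by exact_mod_cast Nat.pos_of_ne_zero hk0
      have hk1 : ((k : Int) - 1) = ((k - 1 : Nat) : Int) := by
        push_cast [Nat.cast_sub (Nat.one_le_iff_ne_zero.mpr hk0)]; ring
      have hkm1 : k - 1 < cs.length := by omega
      have hprev : PySem.List.pyGetD cs ((k : Int) - 1) ' ' = cs[k-1]'hkm1 := by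
        rw [hk1, PySem.List.pyGetD_natCast]
        exact List.getD_eq_getElem cs ' ' hkm1
      have hckk : ∀ (h : k < cs.length), cs[k]'h = c := by
        intro h
        have h2 := hck
        rw [List.getElem?_eq_getElem h, Option.some_inj] at h2
        exact h2
      by_cases hund : cs[k-1]'hkm1 = '_'
      · -- fire: append pending slice plus uppercased char
        have hstep : pvStepA cs (fixed, (si : Int)) ((k : Int), c) =
            (fixed ++ PySem.List.slice cs (some (si : Int)) (some (k : Int)) ++
              [PySem.Chars.upperChar c], (k : Int) + 1) := by
          simp [pvStepA, hprev, hund, hk0]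
        rw [hstep]
        have hTk : (pvT cs)[k]? = some (PySem.Chars.upperChar c) := by
          obtain ⟨m, hm⟩ : ∃ m, k = m + 1 := ⟨k - 1, by omega⟩
          subst hm
          rw [pvT_get_succ cs m (by omega)]
          simp only [Nat.add_sub_cancel] at hund
          rw [if_pos hund]
          exact congrArg (fun x => some (PySem.Chars.upperChar x)) (hckk (by omega))
        have hfix' : fixed ++ PySem.List.slice cs (some (si : Int)) (some (k : Int)) ++
            [PySem.Chars.upperChar c] = (pvT cs).take (k + 1) := by
          rw [PySem.List.slice_natCast, hfix]
          rw [pv_mid_agree (pvT cs) cs si k hsik (by omega)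
            (fun j h1 h2 => hpend j h1 h2)]
          rw [← List.take_add]
          have hsik' : si + (k - si) = k := by omega
          rw [hsik', List.take_succ, hTk]
          rfl
        have hcast : ((k : Int) + 1) = ((k + 1 : Nat) : Int) := by push_cast; ring
        rw [hcast]
        exact ih (k + 1) (k + 1) _ hdrop' (by omega) (by omega) hfix'
          (fun j h1 h2 => by omega)
      · -- no fire
        have hstep : pvStepA cs (fixed, (si : Int)) ((k : Int), c) = (fixed, (si : Int)) := by
          simp [pvStepA, hprev, hund, hk0]
        rw [hstep]
        exact ih (k + 1) si fixed hdrop' (by omega) hsil hfix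
          (fun j h1 h2 => by
            by_cases hjk : j < k
            · exact hpend j h1 hjk
            · have hjeq : j = k := by omega
              subst hjeq
              obtain ⟨m, hm⟩ : ∃ m, j = m + 1 := ⟨j - 1, by omega⟩
              subst hm
              rw [pvT_get_succ cs m (by omega)]
              simp only [Nat.add_sub_cancel] at hund
              rw [if_neg hund]
              exact (List.getElem?_eq_getElem (by omega)).symm)

lemma pv_alt_eq (filename : String) :
    get_fixed_filename_correction_3_alt filename = String.ofList (pvT filename.toList) := by
  have h1 : PySem.List.slice filename.toList none (some 1) = filename.toList.take 1 := by
    simp [pysem]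
  have hmap : (filename.toList.zip filename.toList.tail).map
        (fun pc => if pc.1 = '_' then [PySem.Chars.upperChar pc.2] else [pc.2]) =
        ((filename.toList.zip filename.toList.tail).map
          (fun pc => if pc.1 = '_' then PySem.Chars.upperChar pc.2 else pc.2)).map
          (fun c => [c]) := by
      rw [List.map_map]
      apply List.map_congr_left
      intro pc _
      by_cases h : pc.1 = '_' <;> simp [h]
  simp only [get_fixed_filename_correction_3_alt, pvT, h1, hmap,
    PySem.Chars.join_nil_singletons]

-- ===== VERDICT (by name: the statement is the Claim_ definition above) =====
theorem get_fixed_filename_correction_3_spec : Claim_equal_get_fixed_filename_correction_3 := by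
  intro filename _
  unfold Spec_get_fixed_filename_correction_3
  rw [pv_alt_eq]
  have h := pv_loop_inv filename.toList filename.toList 0 0 []
    (by simp) (Nat.le_refl 0) (Nat.zero_le _) (by simp) (fun j h1 h2 => by omega)
  simp only [Nat.cast_zero] at h
  simp only [get_fixed_filename_correction_3]
  rw [h]
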